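-- pv_equiv track=rewrite | github.com/miliar/Code_Jam_Webscraper | solutions_python/Problem_201/2416.py | longueur_indice
-- ===== SOURCE A (Python) =====
-- bath = ['o','.','.','.','o','o','.','.','.','.','.','.','o','.','o']
--
-- def longueur_indice (bath):
--     longueur_indice = {}
--     longueur = 0
--     for i in range (len(bath)):
--         if bath[i] == '.':
--             longueur = 1
--             for j in range (i+1,len(bath)):
--                 if bath[j] == '.':
--                     longueur += 1
--                 else:
--                     break
--         longueur_indice [i] = longueur
--         longueur = 0
--     return longueur_indice
-- ===== SOURCE B (Python) =====
-- def longueur_indice(bath):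
--     lengths = [0] * len(bath)
--     run = 0
--     for i in range(len(bath) - 1, -1, -1):
--         run = run + 1 if bath[i] == '.' else 0
--         lengths[i] = run
--     return {i: l for i, l in enumerate(lengths)}
-- ===== Notes on version B (the rewrite author's own statement) =====
-- stated objective: alternative
-- what changed: Replaces A's nested rescan (for each index, walk forward counting dots) with one right-to-left pass where each run length is the successor's length plus one; O(n) worst case vs A's O(n^2), though on random inputs with few dots both are effectively linear.
import Mathlib
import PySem

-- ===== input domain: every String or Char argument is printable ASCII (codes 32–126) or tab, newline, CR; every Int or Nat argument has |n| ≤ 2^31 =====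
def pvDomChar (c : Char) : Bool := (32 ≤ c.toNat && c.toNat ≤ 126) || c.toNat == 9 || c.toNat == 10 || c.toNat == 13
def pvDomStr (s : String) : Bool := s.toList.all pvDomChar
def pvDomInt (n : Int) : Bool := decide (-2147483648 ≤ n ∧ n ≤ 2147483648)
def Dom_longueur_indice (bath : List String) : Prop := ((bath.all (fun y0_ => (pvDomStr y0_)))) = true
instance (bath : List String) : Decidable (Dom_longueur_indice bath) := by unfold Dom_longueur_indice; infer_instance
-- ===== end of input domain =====

-- B replaces A's per-index forward rescan with one right-to-left pass (each run length = successor's length + 1).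

-- ===== PORT A =====
-- inner loop: "for j in range(i+1, len(bath)): if bath[j] == '.': longueur += 1 else: break",
-- transliterated as structural recursion on the suffix bath[i+1:] carrying the accumulator.
def pvAInner : List String → Int → Int
  | [], longueur => longueur
  | s :: rest, longueur => if s == "." then pvAInner rest (longueur + 1) else longueur

def longueur_indice (bath : List String) : List (Int × Int) :=
  ((PySem.List.pyRange 0 (bath.length : Int) 1).foldl (fun d i =>
      let longueur : Int :=
        if PySem.List.pyGetD bath i "" == "." then pvAInner (bath.drop (i.toNat + 1)) 1 else 0
      d.insert i longueur) PySem.Dict.empty).items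

-- ===== PORT B =====
-- the right-to-left filling loop of Source B, as structural recursion from the right end
def pvBLengths : List String → List Int
  | [] => []
  | s :: rest =>
    let r := pvBLengths rest
    (if s == "." then r.headD 0 + 1 else 0) :: r

def longueur_indice_alt (bath : List String) : List (Int × Int) :=
  PySem.List.enumerate (pvBLengths bath)

-- ===== PRECONDITION & SPEC =====
def Spec_longueur_indice (bath : List String) (out : List (Int × Int)) : Prop := out = longueur_indice_alt bath
instance (bath : List String) (out : List (Int × Int)) : Decidable (Spec_longueur_indice bath out) := by unfold Spec_longueur_indice; infer_instance

-- ===== CLAIM (what is proved, stated in full; the proofs are below) =====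
def Claim_equal_longueur_indice : Prop := ∀ (bath : List String), Dom_longueur_indice bath → Spec_longueur_indice bath (longueur_indice bath)

-- ===== LEMMAS AND PROOFS =====

theorem pvBLengths_length (bath : List String) : (pvBLengths bath).length = bath.length := by
  induction bath with
  | nil => rfl
  | cons s rest ih => simp [pvBLengths, ih]

theorem pvAInner_acc (l : List String) (acc : Int) : pvAInner l acc = acc + pvAInner l 0 := by
  induction l generalizing acc with
  | nil => simp [pvAInner]
  | cons s rest ih =>
    simp only [pvAInner]
    by_cases h : s == "."
    · simp [h, ih (acc + 1), ih 1]; ring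
    · simp [h]

theorem pvAInner_zero_eq_headD (l : List String) : pvAInner l 0 = (pvBLengths l).headD 0 := by
  induction l with
  | nil => rfl
  | cons s rest ih =>
    simp only [pvAInner, pvBLengths]
    by_cases h : s == "."
    · simp [h, pvAInner_acc rest 1, ih]; omega
    · simp [h]

theorem pvA_val_eq (bath : List String) (i : Nat) (hi : i < bath.length) :
    (if bath.getD i "" == "." then pvAInner (bath.drop (i + 1)) 1 else 0 : Int)
      = (pvBLengths bath).getD i 0 := by
  induction bath generalizing i with
  | nil => simp at hi
  | cons s rest ih =>
    cases i with
    | zero =>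
      simp only [List.getD_cons_zero, pvBLengths]
      by_cases h : s == "."
      · simp [h, pvAInner_acc rest 1, pvAInner_zero_eq_headD]; omega
      · simp [h]
    | succ k =>
      have hk : k < rest.length := by simpa using hi
      simpa [pvBLengths, List.drop_succ_cons] using ih k hk

theorem longueur_indice_eq (bath : List String) : longueur_indice bath = longueur_indice_alt bath := by
  unfold longueur_indice longueur_indice_alt
  rw [PySem.List.enumerate_eq_map_pyRange (d := 0)]
  have hlen : PySem.List.len (pvBLengths bath) = (bath.length : Int) := by
    simp [PySem.List.len, pvBLengths_length]
  rw [hlen, PySem.List.pyRange_zero_natCast]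
  rw [PySem.Dict.items_foldl_insert_fresh
        (List.map (fun k : Nat => (k : Int)) (List.range bath.length))
        (fun i => i)
        (fun i : Int => if PySem.List.pyGetD bath i "" == "." then pvAInner (bath.drop (i.toNat + 1)) 1 else 0)
        PySem.Dict.empty
        (by intro a _; simp [PySem.Dict.contains_empty])
        (by
          simp only [List.map_id']
          exact (List.nodup_range).map (fun a b h => by exact_mod_cast h))]
  show [] ++ _ = _
  rw [List.nil_append, List.map_map, List.map_map]
  refine List.map_congr_left ?_
  intro k hk
  have hk' : k < bath.length := List.mem_range.mp hk
  simp only [Function.comp]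
  refine Prod.ext rfl ?_
  show (if PySem.List.pyGetD bath ((k : Int)) "" == "." then pvAInner (bath.drop (((k : Int)).toNat + 1)) 1 else 0)
      = PySem.List.pyGetD (pvBLengths bath) ((k : Int)) 0
  rw [PySem.List.pyGetD_natCast, PySem.List.pyGetD_natCast, Int.toNat_natCast]
  exact pvA_val_eq bath k hk'

-- ===== VERDICT (by name: the statement is the Claim_ definition above) =====
theorem longueur_indice_spec : Claim_equal_longueur_indice := by
  intro bath _
  unfold Spec_longueur_indice
  exact longueur_indice_eq bath
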